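-- pv_equiv track=rewrite | github.com/Ionescumarius12/task8 | mat.py | count_isolated_ones
-- ===== SOURCE A (Python) =====
-- def is_valid_position(matrix, row, col):
--     return 0 <= row < len(matrix) and 0 <= col < len(matrix[0])
--
-- def count_isolated_ones(matrix):
--     isolated_count = 0
--     for row in range(len(matrix)):
--         for col in range(len(matrix[0])):
--             if matrix[row][col] == 1:
--                 if all(
--                     not is_valid_position(matrix, row + dr, col + dc) or matrix[row + dr][col + dc] == 0
--                     for dr in [-1, 0, 1] for dc in [-1, 0, 1] if dr != 0 or dc != 0
--                 ):
--                     isolated_count += 1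
--     return isolated_count
-- ===== SOURCE B (Python) =====
-- def count_isolated_ones(matrix):
--     # Different algorithm: per-row prefix sums of the nonzero mask, then a cell is
--     # an isolated 1 iff it is 1 and the clipped 3x3 window holds exactly one nonzero.
--     if not matrix:
--         return 0
--     n = len(matrix)
--     w = len(matrix[0])
--     pref = []
--     for row in matrix:
--         p = [0]
--         s = 0
--         for v in row[:w]:
--             s += 1 if v != 0 else 0
--             p.append(s)
--         pref.append(p)
--     count = 0
--     for r in range(n):
--         row = matrix[r]
--         lo_r, hi_r = max(r - 1, 0), min(r + 2, n)
--         for c in range(w):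
--             if row[c] == 1:
--                 lo_c, hi_c = max(c - 1, 0), min(c + 2, w)
--                 win = sum(pref[rr][hi_c] - pref[rr][lo_c] for rr in range(lo_r, hi_r))
--                 if win == 1:
--                     count += 1
--     return count
-- ===== Notes on version B (the rewrite author's own statement) =====
-- stated objective: alternative
-- what changed: A checks each 1-cell's eight neighbours one by one through a bounds helper; B instead builds per-row prefix sums of the nonzero mask in a first pass and then declares a 1-cell isolated exactly when the clipped 3x3 window sum (computed from the prefix sums, no per-neighbour offsets) equals 1.
import Mathlib
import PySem

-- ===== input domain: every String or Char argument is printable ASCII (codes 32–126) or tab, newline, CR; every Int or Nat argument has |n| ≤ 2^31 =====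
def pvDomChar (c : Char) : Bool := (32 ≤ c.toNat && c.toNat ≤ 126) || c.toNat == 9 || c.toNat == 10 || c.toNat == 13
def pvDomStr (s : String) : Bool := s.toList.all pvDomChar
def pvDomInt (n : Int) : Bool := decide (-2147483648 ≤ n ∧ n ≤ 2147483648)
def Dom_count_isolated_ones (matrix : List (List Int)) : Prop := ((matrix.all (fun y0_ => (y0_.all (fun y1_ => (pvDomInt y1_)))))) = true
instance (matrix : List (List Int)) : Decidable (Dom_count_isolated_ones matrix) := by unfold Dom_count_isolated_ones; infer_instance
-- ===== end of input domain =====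

-- B replaces A's per-neighbour bounds-helper checks by a different algorithm: a first pass builds
-- per-row prefix sums of the nonzero mask, then a 1-cell is counted iff its clipped 3x3 window
-- sum equals 1; objective: alternative, same exact count.

-- ===== PORT A =====
-- the eight (dr, dc) offsets generated by 'for dr in [-1,0,1] for dc in [-1,0,1] if dr != 0 or dc != 0'
def pvOffsets : List (Int × Int) :=
  [(-1, -1), (-1, 0), (-1, 1), (0, -1), (0, 1), (1, -1), (1, 0), (1, 1)]

def is_valid_position (matrix : List (List Int)) (row col : Int) : Bool :=
  decide (0 ≤ row) && decide (row < (matrix.length : Int)) &&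
  decide (0 ≤ col) && decide (col < ((PySem.List.pyGetD matrix 0 []).length : Int))

-- matrix[r][c]; the default is only reached outside Pre_ (Python raises IndexError there)
def pvCellA (matrix : List (List Int)) (r c : Int) : Int :=
  PySem.List.pyGetD (PySem.List.pyGetD matrix r []) c 0

def count_isolated_ones (matrix : List (List Int)) : Int :=
  (PySem.List.pyRange 0 (matrix.length : Int)).foldl (fun acc row =>
    (PySem.List.pyRange 0 (((PySem.List.pyGetD matrix 0 []).length : Int))).foldl (fun acc col =>
      if pvCellA matrix row col == 1 then
        if pvOffsets.all (fun d =>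
            !is_valid_position matrix (row + d.1) (col + d.2) ||
            pvCellA matrix (row + d.1) (col + d.2) == 0) then
          acc + 1
        else acc
      else acc) acc) 0

-- ===== PORT B =====
def count_isolated_ones_alt (matrix : List (List Int)) : Int :=
  if matrix.isEmpty then 0
  else
    let n : Int := (matrix.length : Int)
    let w : Nat := (PySem.List.pyGetD matrix 0 []).length
    let pref : List (List Int) := matrix.map (fun row =>
      ((PySem.List.slice row none (some (w : Int))).foldl
        (fun (ps : List Int × Int) v =>
          (ps.1 ++ [ps.2 + (if v != 0 then 1 else 0)], ps.2 + (if v != 0 then 1 else 0)))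
        ([0], 0)).1)
    (PySem.List.pyRange 0 n).foldl (fun acc r =>
      let row := PySem.List.pyGetD matrix r []
      let loR := max (r - 1) 0
      let hiR := min (r + 2) n
      (PySem.List.pyRange 0 (w : Int)).foldl (fun acc c =>
        if PySem.List.pyGetD row c 0 == 1 then
          let loC := max (c - 1) 0
          let hiC := min (c + 2) (w : Int)
          let win := (PySem.List.pyRange loR hiR).foldl (fun s rr =>
            s + (PySem.List.pyGetD (PySem.List.pyGetD pref rr []) hiC 0
               - PySem.List.pyGetD (PySem.List.pyGetD pref rr []) loC 0)) 0
          if win == 1 then acc + 1 else acc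
        else acc) acc) 0

-- ===== PRECONDITION & SPEC =====
-- Pre_ excludes exactly the inputs where A raises IndexError: a matrix whose first row is
-- nonempty and that contains a row shorter than the first (A reads matrix[row][col] for every
-- col < len(matrix[0])).  A is total on everything else, including the empty matrix.
def Pre_count_isolated_ones (matrix : List (List Int)) : Prop :=
  ∀ row ∈ matrix, (PySem.List.pyGetD matrix 0 []).length ≤ row.length
instance (matrix : List (List Int)) : Decidable (Pre_count_isolated_ones matrix) := by
  unfold Pre_count_isolated_ones; infer_instance

def pvWitness_count_isolated_ones : List (List Int) := [[1, 0, 1], [0, 0, 0], [2, 0, 1]]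

def Spec_count_isolated_ones (matrix : List (List Int)) (out : Int) : Prop := out = count_isolated_ones_alt matrix
instance (matrix : List (List Int)) (out : Int) : Decidable (Spec_count_isolated_ones matrix out) := by unfold Spec_count_isolated_ones; infer_instance

-- ===== CLAIM (what is proved, stated in full; the proofs are below) =====
def Claim_equal_count_isolated_ones : Prop := ∀ (matrix : List (List Int)), Dom_count_isolated_ones matrix → Pre_count_isolated_ones matrix → Spec_count_isolated_ones matrix (count_isolated_ones matrix)

-- ===== LEMMAS AND PROOFS =====

-- width of the matrix (len(matrix[0]))
def pvW (matrix : List (List Int)) : Nat := (PySem.List.pyGetD matrix 0 []).length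

-- B's prefix-sum row, as a named function (definitionally the lambda in the port)
def pvPrefRow (w : Nat) (row : List Int) : List Int :=
  ((PySem.List.slice row none (some (w : Int))).foldl
    (fun (ps : List Int × Int) v =>
      (ps.1 ++ [ps.2 + (if v != 0 then 1 else 0)], ps.2 + (if v != 0 then 1 else 0)))
    ([0], 0)).1

-- 0/1 indicator: position is in range and holds a nonzero value
def pvInd (matrix : List (List Int)) (a b : Int) : Int :=
  if is_valid_position matrix a b && (pvCellA matrix a b != 0) then 1 else 0

-- characterisation of the prefix-sum fold
theorem pv_fold_pref (l : List Int) : ∀ (acc : List Int) (s : Int),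
    (l.foldl (fun (ps : List Int × Int) v =>
        (ps.1 ++ [ps.2 + (if v != 0 then 1 else 0)], ps.2 + (if v != 0 then 1 else 0))) (acc, s)).1
    = acc ++ (List.range l.length).map
        (fun j => s + (((l.take (j+1)).countP (fun v => v != 0) : Nat) : Int)) := by
  induction l with
  | nil => simp
  | cons x xs ih =>
    intro acc s
    simp only [List.foldl_cons, List.length_cons, List.range_succ_eq_map, List.map_cons, ih]
    simp only [List.take_succ_cons, List.countP_cons, List.map_map, List.append_assoc,
      List.singleton_append]
    congr 1
    all_goals simp only [List.take_zero, List.countP_nil]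
    all_goals split_ifs <;> simp_all
    all_goals (intro a _; ring)

-- reading the prefix-sum list: entry j is the nonzero count of the first j cells
theorem pv_pref_get (t : List Int) (j : Nat) (hj : j ≤ t.length) :
    PySem.List.pyGetD
      ((t.foldl (fun (ps : List Int × Int) v =>
          (ps.1 ++ [ps.2 + (if v != 0 then 1 else 0)], ps.2 + (if v != 0 then 1 else 0))) ([0], 0)).1)
      (j : Int) 0
    = (((t.take j).countP (fun v => v != 0) : Nat) : Int) := by
  rw [pv_fold_pref, PySem.List.pyGetD_natCast]
  cases j with
  | zero => simp
  | succ k =>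
    rw [List.singleton_append, List.getD_cons_succ,
      PySem.List.getD_map_range _ _ _ _ (by omega)]
    simp

-- a clipped integer range is the unclipped one filtered to [0, n)
theorem pv_range_clip (n : Int) (k : Nat) : ∀ (a b : Int), (b - a).toNat ≤ k →
    PySem.List.pyRange (max a 0) (min b n)
    = (PySem.List.pyRange a b).filter (fun x => decide (0 ≤ x) && decide (x < n)) := by
  induction k with
  | zero =>
    intro a b h
    have hab : b ≤ a := by omega
    rw [PySem.List.pyRange_one_eq_nil hab, PySem.List.pyRange_one_eq_nil (by omega), List.filter_nil]
  | succ k ih =>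
    intro a b h
    by_cases hab : b ≤ a
    · rw [PySem.List.pyRange_one_eq_nil hab, PySem.List.pyRange_one_eq_nil (by omega), List.filter_nil]
    · have hab' : a < b := by omega
      rw [PySem.List.pyRange_one_cons hab', List.filter_cons]
      by_cases h0 : 0 ≤ a
      · by_cases hn : a < n
        · simp only [h0, hn, decide_true, Bool.and_self, if_true]
          rw [← ih (a+1) b (by omega), show max a 0 = a from by omega,
            PySem.List.pyRange_one_cons (by omega : a < min b n),
            show max (a+1) 0 = a + 1 from by omega]
        · simp only [h0, hn, decide_true, decide_false, Bool.and_false]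
          rw [if_neg (by simp)]
          rw [← ih (a+1) b (by omega), PySem.List.pyRange_one_eq_nil (by omega),
            PySem.List.pyRange_one_eq_nil (by omega)]
      · simp only [h0, decide_false, Bool.false_and]
        rw [if_neg (by simp)]
        rw [← ih (a+1) b (by omega), show max a 0 = max (a+1) 0 from by omega]

-- summing a map over a filter is summing an if-guarded map
theorem pv_sum_filter (l : List Int) (q : Int → Bool) (f : Int → Int) :
    ((l.filter q).map f).sum = (l.map (fun x => if q x then f x else 0)).sum := by
  induction l with
  | nil => rfl
  | cons x xs ih =>
    rw [List.filter_cons, List.map_cons, List.sum_cons]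
    by_cases h : q x = true
    · simp only [h, if_true, List.map_cons, List.sum_cons, ih]
    · simp only [Bool.not_eq_true] at h
      simp only [h, Bool.false_eq_true, if_false, ih]
      omega

-- a prefix-sum difference is the 0/1 window sum over the index range
theorem pv_diff_sum (t : List Int) (p : Int → Bool) (lo : Int) (h0 : 0 ≤ lo) :
    ∀ (k : Nat), lo + k ≤ (t.length : Int) →
    ((PySem.List.pyRange lo (lo + (k:Int))).map
        (fun cc => if p (PySem.List.pyGetD t cc 0) then (1 : Int) else 0)).sum
    = (((t.take (lo + (k:Int)).toNat).countP p : Nat) : Int)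
      - (((t.take lo.toNat).countP p : Nat) : Int) := by
  intro k
  induction k with
  | zero => simp
  | succ k ih =>
    intro hk
    have h1 : lo + ((k:Int) + 1) = (lo + (k:Int)) + 1 := by ring
    push_cast at h1 ⊢
    rw [h1, PySem.List.pyRange_one_succ_right (by omega), List.map_append, List.sum_append,
      ih (by omega)]
    have hm : (lo + (k:Int)).toNat < t.length := by omega
    have h2 : (lo + (k:Int) + 1).toNat = (lo + (k:Int)).toNat + 1 := by omega
    rw [h2, List.take_add_one, List.countP_append]
    rw [List.getElem?_eq_getElem hm]
    simp only [Option.toList_some, List.map_cons, List.map_nil, List.sum_cons, List.sum_nil,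
      List.countP_cons, List.countP_nil]
    rw [PySem.List.pyGetD_of_nonneg _ _ (by omega), List.getD_eq_getElem _ _ hm]
    split_ifs <;> push_cast <;> ring

theorem pv_three (c : Int) : PySem.List.pyRange (c - 1) (c + 2) = [c - 1, c, c + 1] := by
  rw [PySem.List.pyRange_one_cons (by omega), PySem.List.pyRange_one_cons (by omega),
    PySem.List.pyRange_one_cons (by omega), PySem.List.pyRange_one_eq_nil (by omega)]
  norm_num

-- one guarded window term is the indicator pvInd
theorem pv_ind_eq (matrix : List (List Int)) (rr cc : Int)
    (h0 : 0 ≤ rr) (hn : rr < (matrix.length : Int))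
    (hrow : pvW matrix ≤ (PySem.List.pyGetD matrix rr []).length) :
    (if decide (0 ≤ cc) && decide (cc < ((pvW matrix) : Int)) then
       (if (PySem.List.pyGetD ((PySem.List.pyGetD matrix rr []).take (pvW matrix)) cc 0) != 0
        then (1 : Int) else 0)
     else 0) = pvInd matrix rr cc := by
  unfold pvInd is_valid_position pvCellA
  by_cases hc0 : 0 ≤ cc
  · by_cases hcw : cc < ((pvW matrix) : Int)
    · have hlt : cc.toNat < ((PySem.List.pyGetD matrix rr []).take (pvW matrix)).length := by
        rw [List.length_take]; omega
      have hlt2 : cc.toNat < (PySem.List.pyGetD matrix rr []).length := by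
        rw [List.length_take] at hlt; omega
      rw [PySem.List.pyGetD_of_nonneg _ _ hc0, PySem.List.pyGetD_of_nonneg _ _ hc0,
        List.getD_eq_getElem _ _ hlt, List.getD_eq_getElem _ _ hlt2, List.getElem_take]
      have hcw2 : cc < ((PySem.List.pyGetD matrix 0 []).length : Int) := by
        simpa [pvW] using hcw
      simp [h0, hn, hc0, hcw2, pvW]
    · have hcw2 : ¬ cc < ((PySem.List.pyGetD matrix 0 []).length : Int) := by
        simpa [pvW] using hcw
      simp [hc0, hcw, hcw2]
  · simp [hc0]

-- the prefix-sum difference of a valid row equals its three window indicators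
theorem pv_colsum (matrix : List (List Int)) (hpre : Pre_count_isolated_ones matrix)
    (rr c : Int) (h0 : 0 ≤ rr) (hn : rr < (matrix.length : Int))
    (hc0 : 0 ≤ c) (hcw : c < ((pvW matrix) : Int)) :
    PySem.List.pyGetD (PySem.List.pyGetD (matrix.map (pvPrefRow (pvW matrix))) rr [])
        (min (c + 2) ((pvW matrix) : Int)) 0
      - PySem.List.pyGetD (PySem.List.pyGetD (matrix.map (pvPrefRow (pvW matrix))) rr [])
        (max (c - 1) 0) 0
    = pvInd matrix rr (c - 1) + pvInd matrix rr c + pvInd matrix rr (c + 1) := by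
  have hlt : rr.toNat < matrix.length := by omega
  have hrowmem : PySem.List.pyGetD matrix rr [] ∈ matrix := by
    rw [PySem.List.pyGetD_of_nonneg _ _ h0, List.getD_eq_getElem _ _ hlt]
    exact List.getElem_mem hlt
  have hwle : pvW matrix ≤ (PySem.List.pyGetD matrix rr []).length := hpre _ hrowmem
  have hpref : PySem.List.pyGetD (matrix.map (pvPrefRow (pvW matrix))) rr []
      = pvPrefRow (pvW matrix) (PySem.List.pyGetD matrix rr []) := by
    rw [PySem.List.pyGetD_of_nonneg _ _ h0, PySem.List.pyGetD_of_nonneg _ _ h0,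
      List.getD_eq_getElem _ _ (by simpa using hlt), List.getD_eq_getElem _ _ hlt,
      List.getElem_map]
  rw [hpref]
  have htake : pvPrefRow (pvW matrix) (PySem.List.pyGetD matrix rr [])
      = (((PySem.List.pyGetD matrix rr []).take (pvW matrix)).foldl
          (fun (ps : List Int × Int) v =>
            (ps.1 ++ [ps.2 + (if v != 0 then 1 else 0)], ps.2 + (if v != 0 then 1 else 0)))
          ([0], 0)).1 := by
    unfold pvPrefRow
    rw [PySem.List.slice_to _ (by positivity)]
    simp
  rw [htake]
  have htlen : ((PySem.List.pyGetD matrix rr []).take (pvW matrix)).length = pvW matrix := by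
    rw [List.length_take]; omega
  have hhi : min (c + 2) ((pvW matrix) : Int) = (((min (c + 2) ((pvW matrix) : Int)).toNat : Nat) : Int) := by omega
  have hlo : max (c - 1) 0 = (((max (c - 1) 0).toNat : Nat) : Int) := by omega
  rw [hhi, hlo,
    pv_pref_get _ _ (by rw [htlen]; omega),
    pv_pref_get _ _ (by rw [htlen]; omega)]
  have hk : max (c - 1) 0 + (((min (c + 2) ((pvW matrix) : Int) - max (c - 1) 0).toNat : Nat) : Int)
      = min (c + 2) ((pvW matrix) : Int) := by omega
  have hdiff := pv_diff_sum ((PySem.List.pyGetD matrix rr []).take (pvW matrix))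
    (fun v => v != 0) (max (c - 1) 0) (by omega)
    ((min (c + 2) ((pvW matrix) : Int) - max (c - 1) 0).toNat) (by rw [htlen]; omega)
  rw [hk] at hdiff
  rw [← hdiff, pv_range_clip ((pvW matrix) : Int) 3 (c - 1) (c + 2) (by omega), pv_three,
    pv_sum_filter]
  simp only [List.map_cons, List.map_nil, List.sum_cons, List.sum_nil]
  rw [pv_ind_eq matrix rr (c - 1) h0 hn hwle, pv_ind_eq matrix rr c h0 hn hwle,
    pv_ind_eq matrix rr (c + 1) h0 hn hwle]
  ring

-- one row term of the window: guarded by row validity it is three indicators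
theorem pv_row_term (matrix : List (List Int)) (hpre : Pre_count_isolated_ones matrix)
    (c : Int) (hc0 : 0 ≤ c) (hcw : c < ((pvW matrix) : Int)) (rr : Int) :
    (if decide (0 ≤ rr) && decide (rr < (matrix.length : Int)) then
       PySem.List.pyGetD (PySem.List.pyGetD (matrix.map (pvPrefRow (pvW matrix))) rr [])
           (min (c + 2) ((pvW matrix) : Int)) 0
         - PySem.List.pyGetD (PySem.List.pyGetD (matrix.map (pvPrefRow (pvW matrix))) rr [])
           (max (c - 1) 0) 0
     else 0)
    = pvInd matrix rr (c - 1) + pvInd matrix rr c + pvInd matrix rr (c + 1) := by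
  by_cases h1 : 0 ≤ rr
  · by_cases h2 : rr < (matrix.length : Int)
    · simp only [h1, h2, decide_true, Bool.and_self, if_true]
      exact pv_colsum matrix hpre rr c h1 h2 hc0 hcw
    · simp [pvInd, is_valid_position, h1, h2]
  · simp [pvInd, is_valid_position, h1]

-- B's window sum is the centre indicator plus the eight offset indicators
theorem pv_win (matrix : List (List Int)) (hpre : Pre_count_isolated_ones matrix)
    (r c : Int) (_h0r : 0 ≤ r) (_hrn : r < (matrix.length : Int))
    (h0c : 0 ≤ c) (hcw : c < ((pvW matrix) : Int)) :
    (PySem.List.pyRange (max (r - 1) 0) (min (r + 2) (matrix.length : Int))).foldl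
      (fun s rr =>
        s + (PySem.List.pyGetD (PySem.List.pyGetD (matrix.map (pvPrefRow (pvW matrix))) rr [])
              (min (c + 2) ((pvW matrix) : Int)) 0
           - PySem.List.pyGetD (PySem.List.pyGetD (matrix.map (pvPrefRow (pvW matrix))) rr [])
              (max (c - 1) 0) 0)) 0
    = pvInd matrix r c
      + (pvOffsets.map (fun d => pvInd matrix (r + d.1) (c + d.2))).sum := by
  rw [PySem.List.foldl_add,
    pv_range_clip (matrix.length : Int) 3 (r - 1) (r + 2) (by omega), pv_three, pv_sum_filter]
  simp only [List.map_cons, List.map_nil, List.sum_cons, List.sum_nil]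
  rw [pv_row_term matrix hpre c h0c hcw (r - 1), pv_row_term matrix hpre c h0c hcw r,
    pv_row_term matrix hpre c h0c hcw (r + 1)]
  simp only [pvOffsets, List.map_cons, List.map_nil, List.sum_cons, List.sum_nil]
  norm_num
  ring

-- an 'all zero tests' Bool equals 'the 0/1 sum is zero'
theorem pv_all_sum (l : List (Int × Int)) (f : Int × Int → Int) (b : Int × Int → Bool)
    (h : ∀ d ∈ l, f d = if b d then 1 else 0) :
    (l.all (fun d => !b d)) = ((l.map f).sum == 0) := by
  induction l with
  | nil => simp
  | cons x xs ih =>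
    have hx : f x = if b x then 1 else 0 := h x (List.mem_cons_self)
    have hnn : 0 ≤ (xs.map f).sum := by
      apply List.sum_nonneg
      intro y hy
      obtain ⟨d, hd, rfl⟩ := List.mem_map.mp hy
      rw [h d (List.mem_cons_of_mem _ hd)]
      split_ifs <;> omega
    rw [List.all_cons, List.map_cons, List.sum_cons,
      ih (fun d hd => h d (List.mem_cons_of_mem _ hd)), hx]
    cases hb : b x
    · simp
    · have hne : (1 : Int) + (xs.map f).sum ≠ 0 := by omega
      simp [hne]

-- per-cell: A's eight-neighbour test equals B's 'window sum == 1'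
theorem pv_cond (matrix : List (List Int)) (hpre : Pre_count_isolated_ones matrix)
    (r c : Int) (h0r : 0 ≤ r) (hrn : r < (matrix.length : Int))
    (h0c : 0 ≤ c) (hcw : c < ((pvW matrix) : Int))
    (hcell : (pvCellA matrix r c == 1) = true) :
    (pvOffsets.all (fun d =>
        !is_valid_position matrix (r + d.1) (c + d.2) ||
        pvCellA matrix (r + d.1) (c + d.2) == 0))
    = ((PySem.List.pyRange (max (r - 1) 0) (min (r + 2) (matrix.length : Int))).foldl
        (fun s rr =>
          s + (PySem.List.pyGetD (PySem.List.pyGetD (matrix.map (pvPrefRow (pvW matrix))) rr [])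
                (min (c + 2) ((pvW matrix) : Int)) 0
             - PySem.List.pyGetD (PySem.List.pyGetD (matrix.map (pvPrefRow (pvW matrix))) rr [])
                (max (c - 1) 0) 0)) 0 == 1) := by
  rw [pv_win matrix hpre r c h0r hrn h0c hcw]
  have hpoint : (fun d : Int × Int =>
      !is_valid_position matrix (r + d.1) (c + d.2) ||
      pvCellA matrix (r + d.1) (c + d.2) == 0)
      = (fun d : Int × Int =>
      !(is_valid_position matrix (r + d.1) (c + d.2) &&
        (pvCellA matrix (r + d.1) (c + d.2) != 0))) := by
    funext d
    cases hv : is_valid_position matrix (r + d.1) (c + d.2) <;>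
      cases he : pvCellA matrix (r + d.1) (c + d.2) == 0 <;> simp [bne, he]
  rw [hpoint, pv_all_sum pvOffsets (fun d => pvInd matrix (r + d.1) (c + d.2))
    (fun d => is_valid_position matrix (r + d.1) (c + d.2) &&
      (pvCellA matrix (r + d.1) (c + d.2) != 0)) (fun d _ => rfl)]
  have hcenter : pvInd matrix r c = 1 := by
    have h1 : pvCellA matrix r c = 1 := by exact_mod_cast beq_iff_eq.mp hcell
    have hcw' : c < ((PySem.List.pyGetD matrix 0 []).length : Int) := by simpa [pvW] using hcw
    simp [pvInd, is_valid_position, h0r, hrn, h0c, hcw', h1]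
  rw [hcenter, Bool.eq_iff_iff, beq_iff_eq, beq_iff_eq]
  omega

-- ===== VERDICT (by name: the statement is the Claim_ definition above) =====
theorem count_isolated_ones_spec : Claim_equal_count_isolated_ones := by
  intro matrix _ hpre
  unfold Spec_count_isolated_ones
  cases hm : matrix with
  | nil => decide
  | cons h t =>
    rw [← hm]
    have hne : matrix.isEmpty = false := by rw [hm]; rfl
    unfold count_isolated_ones count_isolated_ones_alt
    simp only [hne, Bool.false_eq_true, if_false]
    rw [show matrix.map (fun row =>
        ((PySem.List.slice row none (some (((PySem.List.pyGetD matrix 0 []).length : Nat) : Int))).foldl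
          (fun (ps : List Int × Int) v =>
            (ps.1 ++ [ps.2 + (if v != 0 then 1 else 0)], ps.2 + (if v != 0 then 1 else 0)))
          ([0], 0)).1)
      = matrix.map (pvPrefRow (pvW matrix)) from rfl]
    refine PySem.List.foldl_congr_mem _ _ _ _ ?_
    intro acc r hr
    refine PySem.List.foldl_congr_mem _ _ _ _ ?_
    intro acc c hc
    obtain ⟨h0r, hrn⟩ := PySem.List.mem_pyRange_one.mp hr
    obtain ⟨h0c, hcw⟩ := PySem.List.mem_pyRange_one.mp hc
    show (if pvCellA matrix r c == 1 then _ else acc) = (if pvCellA matrix r c == 1 then _ else acc)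
    by_cases hcell : (pvCellA matrix r c == 1) = true
    · simp only [hcell, if_true]
      rw [pv_cond matrix hpre r c h0r hrn h0c hcw hcell]
      rfl
    · simp only [Bool.not_eq_true] at hcell
      simp only [hcell, Bool.false_eq_true, if_false]
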